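-- pv_equiv track=rewrite | github.com/Alectriciti/comfyui-adaptiveprompts | py/generator.py | _find_top_level_separators
-- ===== SOURCE A (Python) =====
-- def _find_top_level_separators(s: str) -> list[tuple[int, str]]:
--     """
--     Returns a list of (index, token) where token is '$$' or '??'
--     """
--     results = []
--     depth = 0
--     i = 0
--     L = len(s)
--
--     while i < L:
--         c = s[i]
--
--         if c == "{":
--             depth += 1
--             i += 1
--             continue
--         if c == "}":
--             if depth > 0:
--                 depth -= 1
--             i += 1
--             continue
--
--         if depth == 0:
--             if s.startswith("$$", i):
--                 results.append((i, "$$"))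
--                 i += 2
--                 continue
--             if s.startswith("??", i):
--                 results.append((i, "??"))
--                 i += 2
--                 continue
--
--         i += 1
--
--     return results
-- ===== SOURCE B (Python) =====
-- def _find_top_level_separators(s: str) -> list[tuple[int, str]]:
--     # pass 1: brace depth BEFORE each index (clamped at 0)
--     depths = []
--     d = 0
--     for c in s:
--         depths.append(d)
--         if c == '{':
--             d += 1
--         elif c == '}' and d > 0:
--             d -= 1
--     # pass 2: non-overlapping scan for '$$'/'??', filtered by the depth table
--     out = []
--     i = 0
--     while i + 1 < len(s):
--         pair = s[i:i + 2]
--         if pair == '$$' or pair == '??':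
--             if depths[i] == 0:
--                 out.append((i, pair))
--             i += 2
--         else:
--             i += 1
--     return out
-- ===== Notes on version B (the rewrite author's own statement) =====
-- stated objective: alternative
-- what changed: Replaces A's single stateful scan (depth tracking and separator matching interleaved, skip-by-2 only at depth 0) with a two-pass decomposition: first build a clamped brace-depth table for every index, then a separate non-overlapping two-char match scan filtered by that table.
import Mathlib
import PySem

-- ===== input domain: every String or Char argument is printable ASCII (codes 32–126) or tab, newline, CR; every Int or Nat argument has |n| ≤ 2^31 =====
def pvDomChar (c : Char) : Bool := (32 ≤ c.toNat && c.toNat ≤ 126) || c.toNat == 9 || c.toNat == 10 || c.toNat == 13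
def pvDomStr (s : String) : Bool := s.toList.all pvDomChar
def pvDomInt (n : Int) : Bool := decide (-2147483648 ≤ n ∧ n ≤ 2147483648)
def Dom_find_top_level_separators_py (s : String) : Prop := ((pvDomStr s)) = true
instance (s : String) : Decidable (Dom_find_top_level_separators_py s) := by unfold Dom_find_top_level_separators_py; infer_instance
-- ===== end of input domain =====

-- B replaces A's single stateful scan with a two-pass decomposition (depth table, then a
-- plain non-overlapping match scan filtered by it); same cost, alternative structure.

-- ===== PORT A =====
-- A's while loop over s (depth and index carried along, startswith = two-char lookahead):
-- recursion on the remaining characters.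
def pvA_loop : List Char → Int → Int → List (Int × String)
  | [], _, _ => []
  | [c], depth, i =>
    if c = '{' then pvA_loop [] (depth + 1) (i + 1)
    else if c = '}' then pvA_loop [] (if depth > 0 then depth - 1 else depth) (i + 1)
    else pvA_loop [] depth (i + 1)  -- startswith at the last index cannot match
  | c1 :: c2 :: rest, depth, i =>
    if c1 = '{' then pvA_loop (c2 :: rest) (depth + 1) (i + 1)
    else if c1 = '}' then pvA_loop (c2 :: rest) (if depth > 0 then depth - 1 else depth) (i + 1)
    else if depth = 0 then
      if c1 = '$' ∧ c2 = '$' then (i, "$$") :: pvA_loop rest 0 (i + 2)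
      else if c1 = '?' ∧ c2 = '?' then (i, "??") :: pvA_loop rest 0 (i + 2)
      else pvA_loop (c2 :: rest) depth (i + 1)
    else pvA_loop (c2 :: rest) depth (i + 1)
  termination_by l _ _ => l.length

def find_top_level_separators_py (s : String) : List (Int × String) :=
  pvA_loop s.toList 0 0

-- ===== PORT B =====
-- pass 1 of Source B: the clamped brace depth BEFORE each index
def pvB_step (d : Int) (c : Char) : Int :=
  if c = '{' then d + 1 else if c = '}' ∧ d > 0 then d - 1 else d

def pvB_depths : List Char → Int → List Int
  | [], _ => []
  | c :: rest, d => d :: pvB_depths rest (pvB_step d c)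

-- pass 2 of Source B: non-overlapping scan for '$$'/'??' over the characters zipped with the depth table
def pvB_loop : List (Char × Int) → Int → List (Int × String)
  | (c1, d1) :: (c2, d2) :: rest, i =>
    if (c1 = '$' ∧ c2 = '$') ∨ (c1 = '?' ∧ c2 = '?') then
      if d1 = 0 then (i, if c1 = '$' then "$$" else "??") :: pvB_loop rest (i + 2)
      else pvB_loop rest (i + 2)
    else pvB_loop ((c2, d2) :: rest) (i + 1)
  | _, _ => []
  termination_by l _ => l.length

def find_top_level_separators_py_alt (s : String) : List (Int × String) :=
  pvB_loop (s.toList.zip (pvB_depths s.toList 0)) 0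

-- ===== PRECONDITION & SPEC =====
def Spec_find_top_level_separators_py (s : String) (out : List (Int × String)) : Prop := out = find_top_level_separators_py_alt s
instance (s : String) (out : List (Int × String)) : Decidable (Spec_find_top_level_separators_py s out) := by unfold Spec_find_top_level_separators_py; infer_instance

-- ===== CLAIM (what is proved, stated in full; the proofs are below) =====
def Claim_equal_find_top_level_separators_py : Prop := ∀ (s : String), Dom_find_top_level_separators_py s → Spec_find_top_level_separators_py s (find_top_level_separators_py s)

-- ===== LEMMAS AND PROOFS =====

theorem pvA_loop_nil (d i : Int) : pvA_loop [] d i = [] := by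
  simp [pvA_loop]

theorem pvA_loop_one (c : Char) (d i : Int) : pvA_loop [c] d i = [] := by
  unfold pvA_loop
  split_ifs <;> simp [pvA_loop]

theorem pvA_loop_cons₂ (c1 c2 : Char) (rest : List Char) (depth i : Int) :
    pvA_loop (c1 :: c2 :: rest) depth i =
      if c1 = '{' then pvA_loop (c2 :: rest) (depth + 1) (i + 1)
      else if c1 = '}' then pvA_loop (c2 :: rest) (if depth > 0 then depth - 1 else depth) (i + 1)
      else if depth = 0 then
        if c1 = '$' ∧ c2 = '$' then (i, "$$") :: pvA_loop rest 0 (i + 2)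
        else if c1 = '?' ∧ c2 = '?' then (i, "??") :: pvA_loop rest 0 (i + 2)
        else pvA_loop (c2 :: rest) depth (i + 1)
      else pvA_loop (c2 :: rest) depth (i + 1) := by
  rw [pvA_loop]

theorem pvB_loop_cons₂ (c1 c2 : Char) (d1 d2 : Int) (rest : List (Char × Int)) (i : Int) :
    pvB_loop ((c1, d1) :: (c2, d2) :: rest) i =
      if (c1 = '$' ∧ c2 = '$') ∨ (c1 = '?' ∧ c2 = '?') then
        if d1 = 0 then (i, if c1 = '$' then "$$" else "??") :: pvB_loop rest (i + 2)
        else pvB_loop rest (i + 2)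
      else pvB_loop ((c2, d2) :: rest) (i + 1) := by
  rw [pvB_loop]

theorem pvB_loop_nil (i : Int) : pvB_loop [] i = [] := by simp [pvB_loop]

theorem pvB_loop_one (p : Char × Int) (i : Int) : pvB_loop [p] i = [] := by simp [pvB_loop]

theorem pvB_depths_cons (c : Char) (r : List Char) (d : Int) :
    pvB_depths (c :: r) d = d :: pvB_depths r (pvB_step d c) := rfl

-- A's scan equals B's filtered match scan over the zipped depth table, for any starting depth.
theorem pvAB_loop_eq : ∀ (n : Nat) (l : List Char) (d i : Int), l.length ≤ n →
    pvA_loop l d i = pvB_loop (l.zip (pvB_depths l d)) i := by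
  intro n
  induction n with
  | zero =>
      intro l d i h
      have : l = [] := List.length_eq_zero_iff.mp (Nat.le_zero.mp h)
      subst this
      rw [pvA_loop_nil, List.zip_nil_left, pvB_loop_nil]
  | succ n ih =>
      intro l d i h
      match l with
      | [] => rw [pvA_loop_nil, List.zip_nil_left, pvB_loop_nil]
      | [c] => rw [pvA_loop_one, pvB_depths_cons, pvB_depths, List.zip_cons_cons,
          List.zip_nil_left, pvB_loop_one]
      | c1 :: c2 :: rest =>
          have hr : rest.length ≤ n := by simp at h; omega
          have hr2 : (c2 :: rest).length ≤ n := by simp at h ⊢; omega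
          rw [pvA_loop_cons₂, pvB_depths_cons, pvB_depths_cons, List.zip_cons_cons,
            List.zip_cons_cons, pvB_loop_cons₂]
          by_cases h1 : c1 = '{'
          · subst h1
            have hnm : ¬(('{' = '$' ∧ c2 = '$') ∨ ('{' = '?' ∧ c2 = '?')) := by
              rintro (⟨h', _⟩ | ⟨h', _⟩) <;> exact absurd h' (by decide)
            rw [if_pos rfl, if_neg hnm, show pvB_step d '{' = d + 1 by simp [pvB_step],
              ih (c2 :: rest) (d + 1) (i + 1) hr2, pvB_depths_cons, List.zip_cons_cons]
          · by_cases h2 : c1 = '}'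
            · subst h2
              have hnm : ¬(('}' = '$' ∧ c2 = '$') ∨ ('}' = '?' ∧ c2 = '?')) := by
                rintro (⟨h', _⟩ | ⟨h', _⟩) <;> exact absurd h' (by decide)
              have hs : pvB_step d '}' = if d > 0 then d - 1 else d := by
                by_cases hd : d > 0 <;> simp [pvB_step, hd]
              rw [if_neg h1, if_pos rfl, if_neg hnm, hs,
                ih (c2 :: rest) (if d > 0 then d - 1 else d) (i + 1) hr2, pvB_depths_cons,
                List.zip_cons_cons]
            · -- c1 is not a brace, so the depth before c1 and before c2 is d
              have hs1 : pvB_step d c1 = d := by simp [pvB_step, h1, h2]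
              rw [if_neg h1, if_neg h2, hs1]
              by_cases hm : (c1 = '$' ∧ c2 = '$') ∨ (c1 = '?' ∧ c2 = '?')
              · rw [if_pos hm]
                have hs2 : pvB_step d c2 = d := by
                  rcases hm with ⟨_, h3⟩ | ⟨_, h3⟩ <;> subst h3 <;> simp [pvB_step]
                rw [hs2]
                by_cases hd : d = 0
                · subst hd
                  rw [if_pos rfl, ih rest 0 (i + 2) hr]
                  rcases hm with ⟨h3, h4⟩ | ⟨h3, h4⟩ <;> subst h3 <;> subst h4 <;>
                    simp
                · -- depth ≠ 0: A takes two single steps over the pair, B skips it; both reach rest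
                  rw [if_neg hd, if_neg hd]
                  have e2 : pvA_loop (c2 :: rest) d (i + 1) = pvA_loop rest d (i + 1 + 1) := by
                    rcases hm with ⟨_, h3⟩ | ⟨_, h3⟩ <;> subst h3 <;>
                      · match rest with
                        | [] => rw [pvA_loop_one, pvA_loop_nil]
                        | c3 :: rest3 =>
                            rw [pvA_loop_cons₂, if_neg (by decide), if_neg (by decide),
                              if_neg hd]
                  have hm' : ¬(c1 = '{') ∧ ¬(c1 = '}') := ⟨h1, h2⟩
                  rcases hm with ⟨h3, _⟩ | ⟨h3, _⟩ <;> subst h3 <;>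
                    rw [e2, show i + 1 + 1 = i + 2 by ring, ih rest d (i + 2) hr]
              · rw [if_neg hm]
                have hA : (if d = 0 then
                      if c1 = '$' ∧ c2 = '$' then (i, "$$") :: pvA_loop rest 0 (i + 2)
                      else if c1 = '?' ∧ c2 = '?' then (i, "??") :: pvA_loop rest 0 (i + 2)
                      else pvA_loop (c2 :: rest) d (i + 1)
                    else pvA_loop (c2 :: rest) d (i + 1)) = pvA_loop (c2 :: rest) d (i + 1) := by
                  have n1 : ¬(c1 = '$' ∧ c2 = '$') := fun hh => hm (Or.inl hh)
                  have n2 : ¬(c1 = '?' ∧ c2 = '?') := fun hh => hm (Or.inr hh)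
                  by_cases hd : d = 0 <;> simp [hd, n1, n2]
                rw [hA, ih (c2 :: rest) d (i + 1) hr2, pvB_depths_cons, List.zip_cons_cons]

-- ===== VERDICT (by name: the statement is the Claim_ definition above) =====
theorem find_top_level_separators_py_spec : Claim_equal_find_top_level_separators_py := by
  intro s _
  unfold Spec_find_top_level_separators_py find_top_level_separators_py find_top_level_separators_py_alt
  exact pvAB_loop_eq s.toList.length s.toList 0 0 le_rfl
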